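-- pv_equiv track=rewrite | github.com/CrysM28/algorithm-study | programmers/practice-kit/heap/디스크 컨트롤러 - fail1.py | solution
-- ===== SOURCE A (Python) =====
-- def solution(jobs):
--     jobs.sort(key = lambda x: x[1])
--
--     answer = 0
--     end = 0
--     for job in jobs:
--         answer += job[1]
--         if end > job[0]:
--             answer += end - job[0]
--         end += job[1]
--
--     return answer // len(jobs)
-- ===== SOURCE B (Python) =====
-- def solution(jobs):
--     remaining = list(jobs)
--     total = 0
--     end = 0
--     while remaining:
--         best = min(remaining, key=lambda x: x[1])
--         remaining.remove(best)
--         total += best[1] + max(0, end - best[0])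
--         end += best[1]
--     return total // len(jobs)
-- ===== Notes on version B (the rewrite author's own statement) =====
-- stated objective: alternative
-- what changed: Replaces sort-then-scan with a selection-based greedy: repeatedly extract the first minimum-duration job from the remaining pool (min + remove) and accumulate its cost on the fly, never sorting; note B does not sort the caller's list in place as A does.
import Mathlib
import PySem

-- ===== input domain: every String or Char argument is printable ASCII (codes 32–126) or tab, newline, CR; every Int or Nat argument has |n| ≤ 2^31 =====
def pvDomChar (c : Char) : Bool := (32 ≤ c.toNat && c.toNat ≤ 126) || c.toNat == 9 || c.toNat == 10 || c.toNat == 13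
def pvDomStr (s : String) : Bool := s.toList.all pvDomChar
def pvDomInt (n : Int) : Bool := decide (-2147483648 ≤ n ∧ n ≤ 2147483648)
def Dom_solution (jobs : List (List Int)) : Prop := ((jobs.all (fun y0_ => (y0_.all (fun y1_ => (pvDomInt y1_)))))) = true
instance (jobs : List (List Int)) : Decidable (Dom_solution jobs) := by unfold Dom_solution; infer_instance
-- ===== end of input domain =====

-- B replaces A's sort-then-scan with a selection-based greedy (repeatedly extract the first
-- minimum-duration job and accumulate its cost); A sorts `jobs` in place, B does not mutate it:
-- the equivalence proved here is about the RETURN value.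

-- shared accessors: Python job[0] / job[1] (Pre_ guarantees the index is in range)
def pvJob0 (job : List Int) : Int := (PySem.List.pyGet? job 0).getD 0
def pvJob1 (job : List Int) : Int := (PySem.List.pyGet? job 1).getD 0

-- ===== PORT A =====
def solution (jobs : List (List Int)) : Int :=
  let js := PySem.List.sorted jobs (fun x => pvJob1 x)
  let r := js.foldl (fun (s : Int × Int) job =>
      let answer := s.1 + pvJob1 job
      let answer := if s.2 > pvJob0 job then answer + (s.2 - pvJob0 job) else answer
      (answer, s.2 + pvJob1 job)) (0, 0)
  PySem.Int.floordiv r.1 js.length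

-- ===== PORT B =====
-- the while-loop: total/end accumulators; min(remaining, key=x[1]) then remaining.remove(best)
def solutionAltGo (remaining : List (List Int)) (total e : Int) : Int :=
  if hne : remaining = [] then total
  else
    match hm : PySem.List.min? remaining (fun x => pvJob1 x) with
    | none => total   -- unreachable: remaining ≠ [] (totality guard)
    | some best =>
      let rest := (PySem.List.remove? remaining best).getD []
      solutionAltGo rest (total + pvJob1 best + max 0 (e - pvJob0 best)) (e + pvJob1 best)
termination_by remaining.length
decreasing_by
  have hmem : best ∈ remaining := PySem.List.min?_mem hm
  simp only [PySem.List.remove?_eq_some_erase _ _ hmem, Option.getD_some]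
  have h1 := List.length_erase_of_mem hmem
  have h2 : 0 < remaining.length := List.length_pos_of_ne_nil hne
  omega

def solution_alt (jobs : List (List Int)) : Int :=
  PySem.Int.floordiv (solutionAltGo jobs 0 0) jobs.length

-- ===== PRECONDITION & SPEC =====
-- Pre_ excludes exactly the inputs where Python A raises: an empty list (ZeroDivisionError)
-- or a job with fewer than 2 entries (IndexError in the sort key or the loop).
def Pre_solution (jobs : List (List Int)) : Prop :=
  jobs ≠ [] ∧ ∀ j ∈ jobs, 2 ≤ j.length
instance (jobs : List (List Int)) : Decidable (Pre_solution jobs) := by unfold Pre_solution; infer_instance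

def pvWitness_solution : List (List Int) := [[0, 3], [1, 9], [2, 6]]

def Spec_solution (jobs : List (List Int)) (out : Int) : Prop := out = solution_alt jobs
instance (jobs : List (List Int)) (out : Int) : Decidable (Spec_solution jobs out) := by unfold Spec_solution; infer_instance

-- ===== CLAIM (what is proved, stated in full; the proofs are below) =====
def Claim_equal_solution : Prop := ∀ (jobs : List (List Int)), Dom_solution jobs → Pre_solution jobs → Spec_solution jobs (solution jobs)

-- ===== LEMMAS AND PROOFS =====

-- the total cost of processing a schedule s starting at end-time e (proof-only characterisation)
def pvCost : List (List Int) → Int → Int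
  | [], _ => 0
  | j :: s, e => pvJob1 j + max 0 (e - pvJob0 j) + pvCost s (e + pvJob1 j)

-- A's loop computes ans + pvCost over the list it scans
theorem pvA_loop (l : List (List Int)) : ∀ (ans e : Int),
    (l.foldl (fun (s : Int × Int) job =>
      let answer := s.1 + pvJob1 job
      let answer := if s.2 > pvJob0 job then answer + (s.2 - pvJob0 job) else answer
      (answer, s.2 + pvJob1 job)) (ans, e)).1
    = ans + pvCost l e := by
  induction l with
  | nil => simp [pvCost]
  | cons j t ih =>
    intro ans e
    simp only [List.foldl_cons, pvCost, ih]
    split_ifs with h <;> omega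

-- min(xs, key)'s folding step, named so the fold can be reasoned about
def pvStep (key : List Int → Int) (acc : Option (List Int)) (x : List Int) : Option (List Int) :=
  match acc with
  | none => some x
  | some m => if key x < key m then some x else some m

theorem pvMin?_eq (key : List Int → Int) (xs : List (List Int)) :
    PySem.List.min? xs key = xs.foldl (pvStep key) none := by
  unfold PySem.List.min?
  congr 1
  funext acc x
  cases acc <;> rfl

-- the fold keeps the FIRST minimum: decomposition of the scanned list around the result
theorem pvMinAux (key : List Int → Int) (t : List (List Int)) : ∀ (m0 m : List Int),
    t.foldl (pvStep key) (some m0) = some m →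
    (m = m0 ∧ ∀ y ∈ t, key m0 ≤ key y) ∨
    (∃ u v, t = u ++ m :: v ∧ key m < key m0 ∧ (∀ y ∈ u, key m < key y) ∧ (∀ y ∈ v, key m ≤ key y)) := by
  induction t with
  | nil => intro m0 m h; left; simp_all [List.foldl_nil]
  | cons x t ih =>
    intro m0 m h
    rw [List.foldl_cons, show pvStep key (some m0) x = if key x < key m0 then some x else some m0 from rfl] at h
    by_cases hx : key x < key m0
    · rw [if_pos hx] at h
      rcases ih x m h with ⟨rfl, hall⟩ | ⟨u, v, rfl, hlt, hu, hv⟩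
      · right; exact ⟨[], t, rfl, hx, by simp, hall⟩
      · right
        refine ⟨x :: u, v, rfl, hlt.trans hx, ?_, hv⟩
        intro y hy
        rcases List.mem_cons.mp hy with rfl | hy
        · exact hlt
        · exact hu y hy
    · rw [if_neg hx] at h
      rcases ih m0 m h with ⟨rfl, hall⟩ | ⟨u, v, rfl, hlt, hu, hv⟩
      · left
        refine ⟨rfl, ?_⟩
        intro y hy
        rcases List.mem_cons.mp hy with rfl | hy
        · exact le_of_not_gt hx
        · exact hall y hy
      · right
        refine ⟨x :: u, v, rfl, hlt, ?_, hv⟩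
        intro y hy
        rcases List.mem_cons.mp hy with rfl | hy
        · exact lt_of_lt_of_le hlt (le_of_not_gt hx)
        · exact hu y hy

-- first-minimum decomposition of a nonempty list
theorem pvMinSplit (key : List Int → Int) (l : List (List Int)) (m : List Int)
    (h : PySem.List.min? l key = some m) :
    ∃ u v, l = u ++ m :: v ∧ (∀ y ∈ u, key m < key y) ∧ (∀ y ∈ v, key m ≤ key y) := by
  cases l with
  | nil => rw [pvMin?_eq] at h; simp [List.foldl_nil] at h
  | cons x t =>
    rw [pvMin?_eq, List.foldl_cons, show pvStep key none x = some x from rfl] at h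
    rcases pvMinAux key t x m h with ⟨rfl, hall⟩ | ⟨u, v, rfl, hlt, hu, hv⟩
    · exact ⟨[], t, rfl, by simp, hall⟩
    · refine ⟨x :: u, v, rfl, ?_, hv⟩
      intro y hy
      rcases List.mem_cons.mp hy with rfl | hy
      · exact hlt
      · exact hu y hy

-- insertBy puts x in front when it goes before everything
theorem pvInsertFront (before : List Int → List Int → Bool) (x : List Int) (ys : List (List Int))
    (h : ∀ y ∈ ys, before x y = true) : PySem.List.insertBy before x ys = x :: ys := by
  cases ys with
  | nil => rfl
  | cons y t => simp [PySem.List.insertBy, h y (by simp)]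

-- a minimal head commutes with the insertion fold
theorem pvFoldConsMin (key : List Int → Int) (m : List Int) (v : List (List Int))
    (hv : ∀ y ∈ v, key m ≤ key y) : ∀ (acc : List (List Int)),
    v.foldl (fun acc x => PySem.List.insertBy (fun a b => decide (key a < key b)) x acc) (m :: acc)
    = m :: v.foldl (fun acc x => PySem.List.insertBy (fun a b => decide (key a < key b)) x acc) acc := by
  induction v with
  | nil => intro acc; rfl
  | cons x t ih =>
    intro acc
    have hx : ¬ key x < key m := not_lt.mpr (hv x (by simp))
    simp only [List.foldl_cons, PySem.List.insertBy, decide_eq_true_eq, hx, if_false]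
    exact ih (fun y hy => hv y (by simp [hy])) _

-- stable sort extracts the first minimum: sorted (u ++ m :: v) = m :: sorted (u ++ v)
theorem pvSortedCons (key : List Int → Int) (u v : List (List Int)) (m : List Int)
    (hu : ∀ y ∈ u, key m < key y) (hv : ∀ y ∈ v, key m ≤ key y) :
    PySem.List.sorted (u ++ m :: v) key false = m :: PySem.List.sorted (u ++ v) key false := by
  rw [PySem.List.sorted_eq_foldl_insertBy, PySem.List.sorted_eq_foldl_insertBy]
  rw [List.foldl_append, List.foldl_cons, List.foldl_append]
  have hfront : PySem.List.insertBy (fun a b => decide (key a < key b)) m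
      (u.foldl (fun acc x => PySem.List.insertBy (fun a b => decide (key a < key b)) x acc) [])
      = m :: u.foldl (fun acc x => PySem.List.insertBy (fun a b => decide (key a < key b)) x acc) [] := by
    apply pvInsertFront
    intro y hy
    rw [← PySem.List.sorted_eq_foldl_insertBy] at hy
    have hyu : y ∈ u := (PySem.List.mem_sorted u key false y).mp hy
    simpa using hu y hyu
  rw [hfront, pvFoldConsMin key m v hv]

-- B's loop computes total + pvCost over the SORTED remaining list
theorem pvB_loop : ∀ (n : Nat) (l : List (List Int)), l.length = n → ∀ (total e : Int),
    solutionAltGo l total e = total + pvCost (PySem.List.sorted l (fun x => pvJob1 x) false) e := by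
  intro n
  induction n using Nat.strong_induction_on with
  | _ n ih =>
    intro l hlen total e
    cases hl : l with
    | nil =>
      subst hl
      rw [solutionAltGo]
      simp [pvCost, show PySem.List.sorted ([] : List (List Int)) (fun x => pvJob1 x) false = [] from rfl]
    | cons x t =>
      subst hl
      rw [solutionAltGo]
      rw [dif_neg (List.cons_ne_nil x t)]
      split
      · next hnone => exact absurd ((PySem.List.min?_eq_none_iff _ _).mp hnone) (List.cons_ne_nil x t)
      · next best hm =>
        have hmem : best ∈ x :: t := PySem.List.min?_mem hm
        obtain ⟨u, v, heq, hu, hv⟩ := pvMinSplit (fun y => pvJob1 y) (x :: t) best hm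
        have hbu : best ∉ u := fun hb => lt_irrefl _ (hu best hb)
        have herase : (x :: t).erase best = u ++ v := by
          rw [heq, List.erase_append_right _ hbu, List.erase_cons_head]
        have hrest : (PySem.List.remove? (x :: t) best).getD [] = u ++ v := by
          rw [PySem.List.remove?_eq_some_erase _ _ hmem, Option.getD_some, herase]
        have hlt : (u ++ v).length < n := by
          have hn : (u ++ best :: v).length = n := by rw [← heq]; exact hlen
          simp only [List.length_append, List.length_cons] at hn ⊢
          omega
        rw [hrest, ih _ hlt _ rfl]
        rw [heq, pvSortedCons (fun y => pvJob1 y) u v best hu hv]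
        simp only [pvCost]
        ring

-- ===== VERDICT (by name: the statement is the Claim_ definition above) =====
theorem solution_spec : Claim_equal_solution := by
  intro jobs _ _
  show solution jobs = solution_alt jobs
  unfold solution solution_alt
  simp only [pvA_loop, pvB_loop jobs.length jobs rfl 0 0, PySem.List.length_sorted]
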